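-- pv_equiv track=rewrite | github.com/Carlos1388/tec-habla | main.py | wavelet_inspired_compare
-- ===== SOURCE A (Python) =====
-- def wavelet_inspired_compare(seq1, seq2, window_size=3):
--     score = 0
--     for i in range(len(seq1) - window_size + 1):
--         subseq1 = seq1[i:i + window_size]
--         subseq2 = seq2[i:i + window_size]
--
--         if subseq1 == subseq2:
--             score += 5  # High bonus for matching subsequence
--         else:
--             for p1, p2 in zip(subseq1, subseq2):
--                 score += 1 if p1 == p2 else -1  # Simple mismatch penalty
--
--     return score
-- ===== SOURCE B (Python) =====
-- def wavelet_inspired_compare(seq1, seq2, window_size=3):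
--     # Prefix sums of per-position equality over the paired positions,
--     # so each window's match count is O(1) instead of an O(w) rescan.
--     pref = [0]
--     for a, b in zip(seq1, seq2):
--         pref.append(pref[-1] + (a == b))
--     m = len(pref) - 1  # number of paired positions
--
--     score = 0
--     for i in range(len(seq1) - window_size + 1):
--         lo = min(i, m)
--         hi = min(i + window_size, m)
--         matches = pref[hi] - pref[lo]
--         if i + window_size <= len(seq2) and matches == window_size:
--             score += 5  # windows are identical
--         else:
--             score += 2 * matches - (hi - lo)
--     return score
-- ===== Notes on version B (the rewrite author's own statement) =====
-- stated objective: faster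
-- what changed: Replaces the per-window slice/compare/zip rescan by one prefix-sum array of per-position equality, so each window's match count and exact-match test are O(1); Pre_ excludes non-positive window sizes, outside the task's natural domain, where A's score comes from negative-stop slice wraparound and empty-window bonuses.
-- outside the precondition, e.g. on wavelet_inspired_compare([1, 2], [3, 4], -1): A returns 14, B returns 3; on wavelet_inspired_compare([3], [], 0): A returns 10, B returns 5
import Mathlib
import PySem

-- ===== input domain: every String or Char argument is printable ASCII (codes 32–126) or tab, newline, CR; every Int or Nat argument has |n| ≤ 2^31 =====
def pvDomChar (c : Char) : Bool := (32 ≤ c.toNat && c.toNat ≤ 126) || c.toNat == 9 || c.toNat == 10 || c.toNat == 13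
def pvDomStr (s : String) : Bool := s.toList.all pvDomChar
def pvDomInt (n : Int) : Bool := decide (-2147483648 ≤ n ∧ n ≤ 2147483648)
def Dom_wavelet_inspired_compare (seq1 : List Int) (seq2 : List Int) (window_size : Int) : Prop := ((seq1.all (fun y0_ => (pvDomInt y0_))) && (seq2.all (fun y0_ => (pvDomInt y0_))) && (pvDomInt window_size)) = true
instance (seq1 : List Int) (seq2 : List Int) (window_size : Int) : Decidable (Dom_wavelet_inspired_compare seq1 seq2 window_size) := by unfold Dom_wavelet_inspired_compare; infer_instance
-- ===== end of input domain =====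

-- B replaces A's per-window slice/compare/zip rescan by one prefix-sum array of
-- per-position equality, making each window's score O(1) arithmetic (measured faster).

-- ===== PORT A =====
def wavelet_inspired_compare (seq1 : List Int) (seq2 : List Int) (window_size : Int) : Int :=
  (PySem.List.pyRange 0 ((seq1.length : Int) - window_size + 1) 1).foldl
    (fun score i =>
      let subseq1 := PySem.List.slice seq1 (some i) (some (i + window_size))
      let subseq2 := PySem.List.slice seq2 (some i) (some (i + window_size))
      if subseq1 = subseq2 then score + 5
      else (subseq1.zip subseq2).foldl
        (fun sc p => sc + (if p.1 = p.2 then 1 else -1)) score)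
    0

-- ===== PORT B =====
-- port of Source B's prefix-sum construction (pref[-1] on the nonempty pref is getLastD 0)
def pvStep (pr : List Int) (p : Int × Int) : List Int :=
  pr ++ [pr.getLastD 0 + (if p.1 = p.2 then 1 else 0)]

def pvPref (seq1 seq2 : List Int) : List Int :=
  (seq1.zip seq2).foldl pvStep [0]

-- body of Source B's window loop
def pvBWin (n2 : Nat) (window_size : Int) (pref : List Int) (m : Int) (score i : Int) : Int :=
  let lo := min i m
  let hi := min (i + window_size) m
  let mcnt := PySem.List.pyGetD pref hi 0 - PySem.List.pyGetD pref lo 0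
  if i + window_size ≤ (n2 : Int) ∧ mcnt = window_size then score + 5
  else score + (2 * mcnt - (hi - lo))

def wavelet_inspired_compare_alt (seq1 : List Int) (seq2 : List Int) (window_size : Int) : Int :=
  let pref := pvPref seq1 seq2
  let m : Int := (pref.length : Int) - 1
  (PySem.List.pyRange 0 ((seq1.length : Int) - window_size + 1) 1).foldl
    (pvBWin seq2.length window_size pref m) 0

-- ===== PRECONDITION & SPEC =====
-- Pre_ excludes non-positive window sizes, outside the task's natural domain, where A's
-- score is an artefact of negative-stop slice wraparound and empty-window bonuses.
def Pre_wavelet_inspired_compare (seq1 : List Int) (seq2 : List Int) (window_size : Int) : Prop :=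
  1 ≤ window_size
instance (seq1 : List Int) (seq2 : List Int) (window_size : Int) : Decidable (Pre_wavelet_inspired_compare seq1 seq2 window_size) := by unfold Pre_wavelet_inspired_compare; infer_instance

def pvWitness_wavelet_inspired_compare : List Int × List Int × Int := ([1, 2, 3, 4], [1, 0, 3, 4], 2)

def Spec_wavelet_inspired_compare (seq1 : List Int) (seq2 : List Int) (window_size : Int) (out : Int) : Prop := out = wavelet_inspired_compare_alt seq1 seq2 window_size
instance (seq1 : List Int) (seq2 : List Int) (window_size : Int) (out : Int) : Decidable (Spec_wavelet_inspired_compare seq1 seq2 window_size out) := by unfold Spec_wavelet_inspired_compare; infer_instance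

-- ===== CLAIM (what is proved, stated in full; the proofs are below) =====
def Claim_equal_wavelet_inspired_compare : Prop := ∀ (seq1 : List Int) (seq2 : List Int) (window_size : Int), Dom_wavelet_inspired_compare seq1 seq2 window_size → Pre_wavelet_inspired_compare seq1 seq2 window_size → Spec_wavelet_inspired_compare seq1 seq2 window_size (wavelet_inspired_compare seq1 seq2 window_size)

-- ===== LEMMAS AND PROOFS =====

theorem drop_min_length {α : Type} (xs : List α) (k : Nat) :
    xs.drop (min k xs.length) = xs.drop k := by
  rcases le_total k xs.length with h | h
  · rw [min_eq_left h]
  · rw [min_eq_right h, List.drop_eq_nil_of_le h, List.drop_eq_nil_of_le (le_refl _)]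

theorem zip_take_take {α β : Type} : ∀ (xs : List α) (ys : List β) (a b : Nat),
    (xs.take a).zip (ys.take b) = (xs.zip ys).take (min a b) := by
  intro xs
  induction xs with
  | nil => intro ys a b; simp
  | cons x xs ih =>
    intro ys a b
    cases ys with
    | nil => simp
    | cons y ys =>
      cases a with
      | zero => simp
      | succ a =>
        cases b with
        | zero => simp
        | succ b =>
          simp only [List.take_succ_cons, List.zip_cons_cons]
          rw [ih, Nat.succ_min_succ, List.take_succ_cons]

theorem zip_drop_drop {α β : Type} : ∀ (xs : List α) (ys : List β) (k : Nat),
    (xs.drop k).zip (ys.drop k) = (xs.zip ys).drop k := by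
  intro xs
  induction xs with
  | nil => intro ys k; simp
  | cons x xs ih =>
    intro ys k
    cases ys with
    | nil => simp
    | cons y ys =>
      cases k with
      | zero => rfl
      | succ k => simp only [List.drop_succ_cons, List.zip_cons_cons]; exact ih ys k

theorem eq_iff_count : ∀ (u v : List Int),
    u = v ↔ (u.length = v.length ∧ (u.zip v).countP (fun p => p.1 == p.2) = u.length) := by
  intro u
  induction u with
  | nil =>
    intro v; cases v <;> simp
  | cons x u ih =>
    intro v
    cases v with
    | nil => simp
    | cons y v =>
      have hle := List.countP_le_length (l := u.zip v) (p := fun p => p.1 == p.2)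
      have hlz := List.length_zip (l₁ := u) (l₂ := v)
      constructor
      · rintro h
        injection h with h1 h2
        subst h1; subst h2
        have := (ih u).1 rfl
        simp [this.2]
      · rintro ⟨h1, h2⟩
        have h1' : u.length = v.length := by simpa using h1
        rw [List.zip_cons_cons, List.countP_cons] at h2
        by_cases hxy : x = y
        · subst hxy
          rw [if_pos (by simp)] at h2
          have hcnt : (u.zip v).countP (fun p => p.1 == p.2) = u.length := by
            simp only [List.length_cons] at h2; omega
          rw [(ih v).2 ⟨h1', hcnt⟩]
        · rw [if_neg (by simp [hxy])] at h2
          exfalso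
          simp only [List.length_cons] at h2
          omega

theorem foldl_pm (l : List (Int × Int)) (s : Int) :
    l.foldl (fun sc p => sc + (if p.1 = p.2 then 1 else -1)) s
      = s + 2 * (l.countP (fun p => p.1 == p.2) : Int) - l.length := by
  induction l generalizing s with
  | nil => simp
  | cons p l ih =>
    simp only [List.foldl_cons, List.countP_cons, List.length_cons, ih]
    by_cases h : p.1 = p.2
    · simp [h]; ring
    · simp [h]; ring

def pvPrefAux (t : Int) : List (Int × Int) → List Int
  | [] => []
  | z :: zs => (t + (if z.1 = z.2 then 1 else 0)) :: pvPrefAux (t + (if z.1 = z.2 then 1 else 0)) zs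

theorem pvPrefAux_length : ∀ (zs : List (Int × Int)) (t : Int), (pvPrefAux t zs).length = zs.length := by
  intro zs
  induction zs with
  | nil => intro t; rfl
  | cons z zs ih => intro t; simp [pvPrefAux, ih]

theorem foldl_pvStep : ∀ (zs : List (Int × Int)) (acc : List Int) (t : Int),
    acc.getLastD 0 = t → zs.foldl pvStep acc = acc ++ pvPrefAux t zs := by
  intro zs
  induction zs with
  | nil => intro acc t _; simp [pvPrefAux]
  | cons z zs ih =>
    intro acc t h
    simp only [List.foldl_cons, pvPrefAux]
    rw [pvStep, h, ih (acc ++ [t + (if z.1 = z.2 then 1 else 0)]) (t + (if z.1 = z.2 then 1 else 0)) (by simp)]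
    simp

theorem pvPref_length (seq1 seq2 : List Int) :
    (pvPref seq1 seq2).length = (seq1.zip seq2).length + 1 := by
  unfold pvPref
  rw [foldl_pvStep (seq1.zip seq2) [0] 0 rfl]
  simp [pvPrefAux_length]

theorem pvPrefAux_getD : ∀ (zs : List (Int × Int)) (t : Int) (k : Nat), k < zs.length →
    (pvPrefAux t zs).getD k 0 = t + ((zs.take (k+1)).countP (fun p => p.1 == p.2) : Int) := by
  intro zs
  induction zs with
  | nil => intro t k hk; simp at hk
  | cons z zs ih =>
    intro t k hk
    cases k with
    | zero =>
      simp only [pvPrefAux, List.getD_cons_zero, List.take_succ_cons, List.take_zero,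
        List.countP_cons, List.countP_nil]
      by_cases h : z.1 = z.2 <;> simp [h]
    | succ k =>
      simp only [List.length_cons] at hk
      simp only [pvPrefAux, List.getD_cons_succ, List.take_succ_cons, List.countP_cons]
      rw [ih _ k (by omega)]
      by_cases h : z.1 = z.2
      · simp only [h, if_pos, beq_self_eq_true]
        push_cast
        ring
      · simp [h]

theorem pvPref_getD (seq1 seq2 : List Int) (k : Nat) (hk : k ≤ (seq1.zip seq2).length) :
    (pvPref seq1 seq2).getD k 0 = (((seq1.zip seq2).take k).countP (fun p => p.1 == p.2) : Int) := by
  unfold pvPref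
  rw [foldl_pvStep (seq1.zip seq2) [0] 0 rfl]
  cases k with
  | zero => simp
  | succ k =>
    simp only [List.length_zip] at hk
    simp only [List.cons_append, List.nil_append, List.getD_cons_succ]
    rw [pvPrefAux_getD _ 0 k (by simp [List.length_zip]; omega)]
    simp

theorem window_eq (seq1 seq2 : List Int) (w i score : Int)
    (hw : 1 ≤ w) (hi : 0 ≤ i) (hiw : i + w ≤ (seq1.length : Int)) :
    (let subseq1 := PySem.List.slice seq1 (some i) (some (i + w))
     let subseq2 := PySem.List.slice seq2 (some i) (some (i + w))
     if subseq1 = subseq2 then score + 5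
     else (subseq1.zip subseq2).foldl
       (fun sc p => sc + (if p.1 = p.2 then 1 else -1)) score)
    = pvBWin seq2.length w (pvPref seq1 seq2) ((pvPref seq1 seq2).length - 1 : Int) score i := by
  obtain ⟨I, rfl⟩ : ∃ I : Nat, i = (I : Int) := ⟨i.toNat, (Int.toNat_of_nonneg hi).symm⟩
  obtain ⟨W, rfl⟩ : ∃ W : Nat, w = (W : Int) := ⟨w.toNat, (Int.toNat_of_nonneg (by omega)).symm⟩
  have hW : 1 ≤ W := by exact_mod_cast hw
  set n1 := seq1.length with hn1
  set n2 := seq2.length with hn2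
  have hIW : I + W ≤ n1 := by exact_mod_cast hiw
  set zs := seq1.zip seq2 with hzs
  have hM : zs.length = min n1 n2 := List.length_zip
  set lo' := min I n2 with hlo'
  set hi' := min (I + W) n2 with hhi'
  -- the slices in drop/take form
  have hcast : (I : Int) + (W : Int) = ((I + W : Nat) : Int) := by push_cast; ring
  have hs1 : PySem.List.slice seq1 (some (I : Int)) (some ((I : Int) + (W : Int)))
      = (seq1.drop I).take W := by
    rw [hcast]
    simp only [PySem.List.slice, PySem.List.clampIdx_natCast, ← hn1]
    rw [hn1, drop_min_length, ← hn1]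
    congr 1
    omega
  have hs2 : PySem.List.slice seq2 (some (I : Int)) (some ((I : Int) + (W : Int)))
      = (seq2.drop I).take (hi' - lo') := by
    rw [hcast]
    simp only [PySem.List.slice, PySem.List.clampIdx_natCast, ← hn2]
    rw [hn2, drop_min_length, ← hn2, ← hhi', ← hlo']
  -- B's boundaries
  have hprefl := pvPref_length seq1 seq2
  have hmv : ((pvPref seq1 seq2).length : Int) - 1 = (zs.length : Int) := by
    rw [← hzs] at hprefl; rw [hprefl]; push_cast; ring
  have hloI : min (I : Int) (((pvPref seq1 seq2).length : Int) - 1) = ((lo' : Nat) : Int) := by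
    rw [hmv]; rw [hlo']; push_cast; omega
  have hhiI : min ((I : Int) + (W : Int)) (((pvPref seq1 seq2).length : Int) - 1)
      = ((hi' : Nat) : Int) := by
    rw [hmv]; rw [hhi']; push_cast; omega
  have hlole : lo' ≤ zs.length := by omega
  have hhile : hi' ≤ zs.length := by omega
  have hmatch : PySem.List.pyGetD (pvPref seq1 seq2) ((hi' : Nat) : Int) 0
        - PySem.List.pyGetD (pvPref seq1 seq2) ((lo' : Nat) : Int) 0
      = ((zs.take hi').countP (fun p => p.1 == p.2) : Int)
        - ((zs.take lo').countP (fun p => p.1 == p.2) : Int) := by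
    rw [PySem.List.pyGetD_natCast, PySem.List.pyGetD_natCast,
      pvPref_getD seq1 seq2 hi' (by rw [← hzs]; omega),
      pvPref_getD seq1 seq2 lo' (by rw [← hzs]; omega)]
  rcases le_total I n2 with hI2 | hI2
  · -- paired positions reach the window start
    have hloI' : lo' = I := min_eq_left hI2
    set z := hi' - lo' with hzdef
    have hhi'' : hi' = I + z := by omega
    have hzle : z ≤ W := by omega
    have hzn2 : z ≤ n2 - I := by omega
    -- window match count
    have hcnt : ((zs.take hi').countP (fun p => p.1 == p.2) : Int)
          - ((zs.take lo').countP (fun p => p.1 == p.2) : Int)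
        = (((zs.drop I).take z).countP (fun p => p.1 == p.2) : Int) := by
      rw [hhi'', hloI', List.take_add, List.countP_append]
      push_cast; ring
    -- the zipped window
    have hzip : ((seq1.drop I).take W).zip ((seq2.drop I).take (hi' - lo'))
        = (zs.drop I).take z := by
      rw [zip_take_take, zip_drop_drop, ← hzs, ← hzdef,
        show min W z = z from min_eq_right hzle]
    have hlen1 : ((seq1.drop I).take W).length = W := by
      simp [List.length_take, List.length_drop]; omega
    have hlen2 : ((seq2.drop I).take (hi' - lo')).length = z := by
      simp [List.length_take, List.length_drop, ← hzdef]; omega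
    have hzlen : ((zs.drop I).take z).length = z := by
      simp [List.length_take, List.length_drop]; omega
    set cnt := ((zs.drop I).take z).countP (fun p => p.1 == p.2) with hcntdef
    have heq : ((seq1.drop I).take W = (seq2.drop I).take (hi' - lo'))
        ↔ (W = z ∧ cnt = W) := by
      rw [eq_iff_count, hlen1, hlen2, hzip, ← hcntdef]
    simp only [hs1, hs2, pvBWin, hloI, hhiI, hmatch, hcnt]
    by_cases hcond : W = z ∧ cnt = W
    · rw [if_pos (heq.2 hcond)]
      rw [if_pos ⟨by omega, by exact_mod_cast hcond.2⟩]
    · rw [if_neg (fun h => hcond (heq.1 h))]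
      rw [if_neg (by
        rintro ⟨h1, h2⟩
        have h1' : I + W ≤ n2 := by exact_mod_cast h1
        exact hcond ⟨by omega, by exact_mod_cast h2⟩)]
      rw [foldl_pm, hzip, hzlen, ← hcntdef]
      have : ((hi' : Int)) - ((lo' : Int)) = (z : Int) := by omega
      rw [this]
      ring
  · -- window starts beyond the paired positions: empty second slice, zero mcnt
    have h0 : hi' - lo' = 0 := by omega
    have hlh : lo' = hi' := by omega
    simp only [hs1, hs2, pvBWin, hloI, hhiI, hmatch, h0, List.take_zero]
    rw [hlh, sub_self]
    rw [if_neg (by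
      intro h
      have : ((seq1.drop I).take W).length = 0 := by rw [h]; simp
      rw [List.length_take, List.length_drop] at this
      omega)]
    rw [if_neg (by
      rintro ⟨h1, _⟩
      have : I + W ≤ n2 := by exact_mod_cast h1
      omega)]
    simp

-- ===== VERDICT (by name: the statement is the Claim_ definition above) =====
theorem wavelet_inspired_compare_spec : Claim_equal_wavelet_inspired_compare := by
  intro seq1 seq2 w _ hpre
  unfold Spec_wavelet_inspired_compare wavelet_inspired_compare wavelet_inspired_compare_alt
  apply PySem.List.foldl_congr_mem
  intro acc i hmem
  obtain ⟨h0, h1⟩ := (PySem.List.mem_pyRange_one).1 hmem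
  exact window_eq seq1 seq2 w i acc hpre h0 (by omega)
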